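-- pv_equiv track=rewrite | github.com/hiyamdebary/interferometry_aperture_configuration | aperture_configuration.py | davies_configuration_1
-- ===== SOURCE A (Python) =====
-- def davies_configuration_1(m):
--     lenslet_configurations = []
--     offset_start = 1
--     offset_convention = +1
--     def add_line(davies_baseline, offset_start):
--         A = offset_start
--         B = offset_start + davies_baseline + offset_convention
--         lenslet_configurations.append((A, B))
--         offset_start += 1
--         return offset_start
--     for j in range(m-1):
--         offset_start = add_line(4*m-4 - 2*j, offset_start)
--     offset_start = add_line(4*m-2, offset_start)
--     for j in range(m-1):
--         offset_start = add_line(2*m-3 - 2*j, offset_start)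
--     offset_start = add_line(4*m-1, offset_start)
--     offset_start += m-1
--     offset_start += m-1
--     offset_start = add_line(4*m, offset_start)
--     for j in range(m-1):
--         offset_start = add_line(4*m-3 - 2*j, offset_start)
--     offset_start += 1
--     for j in range(m-1):
--         offset_start = add_line(2*m-2 - 2*j, offset_start)
--     offset_start = add_line(2*m-1, offset_start)
--     offset_start += m-1
--     offset_start += m-1
--     offset_start += 1
--     offset_start += 1
--     return lenslet_configurations
-- ===== SOURCE B (Python) =====
-- def davies_configuration_1(m):
--     # Closed-form: each tuple's first element is computed directly from its
--     # segment's starting offset; no mutable offset accumulator.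
--     return (
--         [(1 + j, 4*m - 2 - j) for j in range(m - 1)]
--         + [(m, 5*m - 1)]
--         + [(m + 1 + j, 3*m - 1 - j) for j in range(m - 1)]
--         + [(2*m, 6*m)]
--         + [(4*m - 1, 8*m)]
--         + [(4*m + j, 8*m - 2 - j) for j in range(m - 1)]
--         + [(5*m + j, 7*m - 1 - j) for j in range(m - 1)]
--         + [(6*m - 1, 8*m - 1)]
--     )
-- ===== Notes on version B (the rewrite author's own statement) =====
-- stated objective: simpler
-- what changed: Replaced the mutable offset_start accumulator threaded through an add_line closure and many offset jumps by closed-form per-segment formulas: each tuple is (A, B) computed directly from its position, and the four segments plus four standalone tuples are concatenated. Pre_ excludes m <= 0, outside the natural domain of an m-lenslet aperture, where A's returned tuples are an accident of the leftover offset accumulator.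
-- outside the precondition, e.g. on davies_configuration_1(0): A returns [(1, 0), (2, 2), (1, 2), (3, 3)], B returns [(0, -1), (0, 0), (-1, 0), (-1, -1)]
import Mathlib
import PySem

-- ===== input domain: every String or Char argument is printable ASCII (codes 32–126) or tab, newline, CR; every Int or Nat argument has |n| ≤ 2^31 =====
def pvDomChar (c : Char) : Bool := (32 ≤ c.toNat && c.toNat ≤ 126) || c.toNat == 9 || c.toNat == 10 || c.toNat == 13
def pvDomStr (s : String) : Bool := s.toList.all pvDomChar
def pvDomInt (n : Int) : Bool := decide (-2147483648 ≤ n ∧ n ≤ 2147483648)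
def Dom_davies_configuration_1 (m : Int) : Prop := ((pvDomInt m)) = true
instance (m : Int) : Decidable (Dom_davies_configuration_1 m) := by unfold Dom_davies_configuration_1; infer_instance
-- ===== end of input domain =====

-- B replaces A's mutable offset accumulator with closed-form per-segment formulas (objective: simpler).


-- ===== PORT A =====
-- add_line(davies_baseline, offset_start): appends (A, B) and returns offset_start+1;
-- state is (lenslet_configurations, offset_start); offset_convention = +1.
def pvAddLine (db : Int) (st : List (Int × Int) × Int) : List (Int × Int) × Int :=
  (st.1 ++ [(st.2, st.2 + db + 1)], st.2 + 1)

def davies_configuration_1 (m : Int) : List (Int × Int) :=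
  let st0 : List (Int × Int) × Int := ([], 1)
  let st1 := (PySem.List.pyRange 0 (m-1) 1).foldl (fun st j => pvAddLine (4*m-4 - 2*j) st) st0
  let st2 := pvAddLine (4*m-2) st1
  let st3 := (PySem.List.pyRange 0 (m-1) 1).foldl (fun st j => pvAddLine (2*m-3 - 2*j) st) st2
  let st4 := pvAddLine (4*m-1) st3
  let st4' := (st4.1, st4.2 + (m-1) + (m-1))
  let st5 := pvAddLine (4*m) st4'
  let st6 := (PySem.List.pyRange 0 (m-1) 1).foldl (fun st j => pvAddLine (4*m-3 - 2*j) st) st5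
  let st6' := (st6.1, st6.2 + 1)
  let st7 := (PySem.List.pyRange 0 (m-1) 1).foldl (fun st j => pvAddLine (2*m-2 - 2*j) st) st6'
  let st8 := pvAddLine (2*m-1) st7
  st8.1

-- ===== PORT B =====
def davies_configuration_1_alt (m : Int) : List (Int × Int) :=
  (PySem.List.pyRange 0 (m-1) 1).map (fun j => (1 + j, 4*m - 2 - j))
  ++ [(m, 5*m - 1)]
  ++ (PySem.List.pyRange 0 (m-1) 1).map (fun j => (m + 1 + j, 3*m - 1 - j))
  ++ [(2*m, 6*m)]
  ++ [(4*m - 1, 8*m)]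
  ++ (PySem.List.pyRange 0 (m-1) 1).map (fun j => (4*m + j, 8*m - 2 - j))
  ++ (PySem.List.pyRange 0 (m-1) 1).map (fun j => (5*m + j, 7*m - 1 - j))
  ++ [(6*m - 1, 8*m - 1)]

-- ===== PRECONDITION & SPEC =====
-- Pre_ excludes m ≤ 0, outside the natural domain of an m-lenslet aperture, where A's
-- returned tuples are an accident of the leftover offset accumulator.
def Pre_davies_configuration_1 (m : Int) : Prop := 1 ≤ m
instance (m : Int) : Decidable (Pre_davies_configuration_1 m) := by unfold Pre_davies_configuration_1; infer_instance
def pvWitness_davies_configuration_1 : Int := (3)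

def Spec_davies_configuration_1 (m : Int) (out : List (Int × Int)) : Prop := out = davies_configuration_1_alt m
instance (m : Int) (out : List (Int × Int)) : Decidable (Spec_davies_configuration_1 m out) := by unfold Spec_davies_configuration_1; infer_instance

-- ===== CLAIM (what is proved, stated in full; the proofs are below) =====
def Claim_equal_davies_configuration_1 : Prop := ∀ (m : Int), Dom_davies_configuration_1 m → Pre_davies_configuration_1 m → Spec_davies_configuration_1 m (davies_configuration_1 m)

-- ===== LEMMAS AND PROOFS =====

-- One loop of A: folding pvAddLine with baseline b - 2*j over range(0,n) appends the
-- corresponding closed-form tuples and advances the offset by n.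
theorem pvFoldSeg (b : Int) (n : Nat) (acc : List (Int × Int)) (s : Int) :
    (PySem.List.pyRange 0 (n : Int) 1).foldl
        (fun st j => (st.1 ++ [(st.2, st.2 + (b - 2*j) + 1)], st.2 + 1)) (acc, s)
      = (acc ++ (PySem.List.pyRange 0 (n : Int) 1).map (fun j => (s + j, s + j + (b - 2*j) + 1)),
         s + n) := by
  induction n with
  | zero => simp [PySem.List.pyRange_one_eq_nil]
  | succ k ih =>
    have h : PySem.List.pyRange 0 ((k : Int) + 1) 1
        = PySem.List.pyRange 0 (k : Int) 1 ++ [(k : Int)] :=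
      PySem.List.pyRange_one_succ_right (by exact_mod_cast Nat.zero_le k)
    push_cast
    rw [h, List.foldl_append, List.map_append, ih]
    simp
    omega

theorem davies_eq (m : Int) (hm : 1 ≤ m) :
    davies_configuration_1 m = davies_configuration_1_alt m := by
  obtain ⟨n, rfl⟩ : ∃ n : Nat, m = (n : Int) + 1 := ⟨(m-1).toNat, by omega⟩
  have h1 : ((n : Int) + 1) - 1 = (n : Int) := by ring
  unfold davies_configuration_1 davies_configuration_1_alt
  rw [h1]
  simp only [pvAddLine]
  simp only [pvFoldSeg]
  simp only [List.append_assoc, List.nil_append]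
  congr 1
  · exact List.map_congr_left (fun j _ => by rw [Prod.mk.injEq]; exact ⟨by ring, by ring⟩)
  congr 1
  · rw [List.cons.injEq, Prod.mk.injEq]; exact ⟨⟨by ring, by ring⟩, rfl⟩
  congr 1
  · exact List.map_congr_left (fun j _ => by rw [Prod.mk.injEq]; exact ⟨by ring, by ring⟩)
  congr 1
  · rw [List.cons.injEq, Prod.mk.injEq]; exact ⟨⟨by ring, by ring⟩, rfl⟩
  congr 1
  · rw [List.cons.injEq, Prod.mk.injEq]; exact ⟨⟨by ring, by ring⟩, rfl⟩
  congr 1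
  · exact List.map_congr_left (fun j _ => by rw [Prod.mk.injEq]; exact ⟨by ring, by ring⟩)
  congr 1
  · exact List.map_congr_left (fun j _ => by rw [Prod.mk.injEq]; exact ⟨by ring, by ring⟩)
  rw [List.cons.injEq, Prod.mk.injEq]; exact ⟨⟨by ring, by ring⟩, rfl⟩

-- ===== VERDICT (by name: the statement is the Claim_ definition above) =====
theorem davies_configuration_1_spec : Claim_equal_davies_configuration_1 := by
  intro m _ hm
  exact davies_eq m hm
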